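-- pv_equiv track=rewrite | github.com/FlaSpaceInst/EZ-RASSOR | packages/simulation/ez_rassor_control/scripts/wheels.py | get_movements
-- ===== SOURCE A (Python) =====
-- def get_movements(integer, mask):
--     """Decode a bitstring to reveal the movement commands for this node."""
--
--     # Use a mask to remove unnecessary bits.
--     result = integer & mask
--
--     # Shift the result so the commands are the 4 least significant bits. The
--     # amount of shifting is determined by the mask.
--     while mask % 2 == 0:
--         result >>= 1
--         mask >>= 1
--
--     # Return the 4 least significant bits as boolean values.
--     return (
--         result & 0b1000 != 0,
--         result & 0b100 != 0,
--         result & 0b10 != 0,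
--         result & 0b1 != 0
--     )
-- ===== SOURCE B (Python) =====
-- def get_movements(integer, mask):
--     """Decode a bitstring to reveal the movement commands for this node."""
--     # Closed-form shift: the lowest set bit of the mask gives the number of
--     # trailing zeros directly, no loop needed.
--     low = mask & -mask
--     shift = low.bit_length() - 1
--     result = (integer & mask) >> shift
--     return (
--         result & 0b1000 != 0,
--         result & 0b100 != 0,
--         result & 0b10 != 0,
--         result & 0b1 != 0
--     )
-- ===== Notes on version B (the rewrite author's own statement) =====
-- stated objective: alternative
-- what changed: Replaces A's trailing-zero-counting while loop (repeatedly halving mask and result) with a closed-form computation of the shift amount via the lowest-set-bit trick (mask & -mask, bit_length) followed by a single shift.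
import Mathlib
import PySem

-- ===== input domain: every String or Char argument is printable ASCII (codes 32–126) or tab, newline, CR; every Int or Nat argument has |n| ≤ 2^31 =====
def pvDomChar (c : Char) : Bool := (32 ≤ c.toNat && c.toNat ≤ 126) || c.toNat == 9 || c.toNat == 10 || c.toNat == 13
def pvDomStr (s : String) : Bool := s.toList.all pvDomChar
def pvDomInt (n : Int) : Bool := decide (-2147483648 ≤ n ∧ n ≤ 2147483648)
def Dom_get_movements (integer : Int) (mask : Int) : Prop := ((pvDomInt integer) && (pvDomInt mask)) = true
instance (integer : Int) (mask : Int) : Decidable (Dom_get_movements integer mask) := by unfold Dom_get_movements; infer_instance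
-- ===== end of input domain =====

-- B computes the shift amount in closed form via the lowest-set-bit trick instead of A's
-- trailing-zero-counting while loop (objective: alternative); same four-bit boolean tuple.


-- ===== PORT A =====
-- 'while mask % 2 == 0: result >>= 1; mask >>= 1' ;  the 'mask ≠ 0' conjunct is a pure
-- totality guard: at mask = 0 the Python loop never terminates (excluded by Pre_).
def get_movements_loop (result mask : Int) : Bool × Bool × Bool × Bool :=
  if h : PySem.Int.mod mask 2 = 0 ∧ mask ≠ 0 then
    get_movements_loop (result >>> (1 : Nat)) (mask >>> (1 : Nat))
  else
    (decide (PySem.Int.band result 8 ≠ 0),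
     decide (PySem.Int.band result 4 ≠ 0),
     decide (PySem.Int.band result 2 ≠ 0),
     decide (PySem.Int.band result 1 ≠ 0))
termination_by mask.natAbs
decreasing_by
  obtain ⟨h1, h2⟩ := h
  rw [PySem.Int.mod_eq_zero_iff_dvd] at h1
  obtain ⟨k, hk⟩ := h1
  rw [Int.shiftRight_eq_div_pow]
  simp only [pow_one]
  omega

def get_movements (integer : Int) (mask : Int) : Bool × Bool × Bool × Bool :=
  get_movements_loop (PySem.Int.band integer mask) mask

-- ===== PORT B =====
-- low = mask & -mask; shift = low.bit_length() - 1; result = (integer & mask) >> shift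
def get_movements_alt (integer : Int) (mask : Int) : Bool × Bool × Bool × Bool :=
  let low := PySem.Int.band mask (-mask)
  let shift := PySem.Int.bitLength low - 1
  let result := (PySem.Int.band integer mask) >>> shift
  (decide (PySem.Int.band result 8 ≠ 0),
   decide (PySem.Int.band result 4 ≠ 0),
   decide (PySem.Int.band result 2 ≠ 0),
   decide (PySem.Int.band result 1 ≠ 0))

-- ===== PRECONDITION & SPEC =====
-- Pre_ excludes only mask = 0: there A's while loop never terminates (Python A never
-- returns) and B raises ValueError on the negative shift count.
def Pre_get_movements (integer : Int) (mask : Int) : Prop := mask ≠ 0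
instance (integer : Int) (mask : Int) : Decidable (Pre_get_movements integer mask) := by unfold Pre_get_movements; infer_instance
def pvWitness_get_movements : Int × Int := (10, 2)

def Spec_get_movements (integer : Int) (mask : Int) (out : Bool × Bool × Bool × Bool) : Prop := out = get_movements_alt integer mask
instance (integer : Int) (mask : Int) (out : Bool × Bool × Bool × Bool) : Decidable (Spec_get_movements integer mask out) := by unfold Spec_get_movements; infer_instance

-- ===== CLAIM (what is proved, stated in full; the proofs are below) =====
def Claim_equal_get_movements : Prop := ∀ (integer : Int) (mask : Int), Dom_get_movements integer mask → Pre_get_movements integer mask → Spec_get_movements integer mask (get_movements integer mask)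

-- ===== LEMMAS AND PROOFS =====

-- the common tail of both ports: the four least significant bits as booleans
def gmBits (r : Int) : Bool × Bool × Bool × Bool :=
  (decide (PySem.Int.band r 8 ≠ 0),
   decide (PySem.Int.band r 4 ≠ 0),
   decide (PySem.Int.band r 2 ≠ 0),
   decide (PySem.Int.band r 1 ≠ 0))

-- n - (n &&& (n-1)) on Nat: the lowest set bit
def natLow (n : Nat) : Nat := n - (n &&& (n - 1))

lemma land_pred_of_odd (n : Nat) (h : n % 2 = 1) : n &&& (n - 1) = n - 1 := by
  apply Nat.eq_of_testBit_eq
  intro i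
  simp only [Nat.testBit_land]
  cases i with
  | zero => simp [Nat.testBit_zero]; omega
  | succ i =>
    simp only [Nat.testBit_succ]
    have : n / 2 = (n - 1) / 2 := by omega
    rw [this, Bool.and_self]

lemma land_pred_double (k : Nat) (h : 0 < k) : (2 * k) &&& (2 * k - 1) = 2 * (k &&& (k - 1)) := by
  apply Nat.eq_of_testBit_eq
  intro i
  simp only [Nat.testBit_land]
  cases i with
  | zero => simp [Nat.testBit_zero]
  | succ i =>
    simp only [Nat.testBit_succ]
    have h1 : 2 * k / 2 = k := by omega
    have h2 : (2 * k - 1) / 2 = k - 1 := by omega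
    have h3 : 2 * (k &&& (k - 1)) / 2 = k &&& (k - 1) := by omega
    rw [h1, h2, h3, ← Nat.testBit_land]

lemma natLow_of_odd (n : Nat) (h : n % 2 = 1) : natLow n = 1 := by
  unfold natLow
  rw [land_pred_of_odd n h]
  omega

lemma natLow_double (k : Nat) (h : 0 < k) : natLow (2 * k) = 2 * natLow k := by
  unfold natLow
  rw [land_pred_double k h]
  have := Nat.and_le_left (n := k) (m := k - 1)
  omega

lemma natLow_pos (n : Nat) (h : 0 < n) : 0 < natLow n := by
  unfold natLow
  have := Nat.and_le_right (n := n) (m := n - 1)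
  omega

-- PySem.Int.band m (-m) is natLow of |m|, for every nonzero m (both signs)
lemma band_neg_self (m : Int) (h : m ≠ 0) :
    PySem.Int.band m (-m) = ((natLow m.natAbs : Nat) : Int) := by
  unfold PySem.Int.band natLow
  rcases lt_or_gt_of_ne h with hm | hm
  · have h1 : ¬ (0 ≤ m) := by omega
    have h2 : (0 : Int) ≤ -m := by omega
    simp only [h1, h2, if_true, if_false]
    have e1 : (-m).toNat = m.natAbs := by omega
    have e2 : (-m - 1).toNat = m.natAbs - 1 := by omega
    rw [e1, e2]
  · have h1 : (0 : Int) ≤ m := by omega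
    have h2 : ¬ ((0 : Int) ≤ -m) := by omega
    simp only [h1, h2, if_true, if_false]
    have e1 : m.toNat = m.natAbs := by omega
    have e2 : (-(-m) - 1).toNat = m.natAbs - 1 := by omega
    rw [e1, e2]

lemma bitLength_pos (x : Nat) (h : 0 < x) : 0 < PySem.Int.bitLength (x : Int) := by
  rw [PySem.Int.bitLength_natCast h]
  omega

lemma shiftr_one (r : Int) : r >>> (1 : Nat) = r / 2 := by
  rw [Int.shiftRight_eq_div_pow]; norm_num

lemma shiftr_succ (r : Int) (s : Nat) : r >>> (s + 1) = (r >>> (1 : Nat)) >>> s := by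
  rw [Int.shiftRight_eq_div_pow, Int.shiftRight_eq_div_pow, Int.shiftRight_eq_div_pow, pow_succ]
  push_cast
  rw [mul_comm ((2 : Int) ^ s) 2, ← Int.ediv_ediv_of_nonneg (by norm_num : (0 : Int) ≤ 2)]

-- main invariant: A's loop equals B's closed-form shift, for every nonzero mask
lemma loop_eq_closed (n : Nat) : ∀ (m r : Int), m.natAbs = n → m ≠ 0 →
    get_movements_loop r m = gmBits (r >>> (PySem.Int.bitLength (PySem.Int.band m (-m)) - 1)) := by
  induction n using Nat.strong_induction_on with
  | _ n ih =>
    intro m r hn hm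
    rw [band_neg_self m hm]
    by_cases he : PySem.Int.mod m 2 = 0
    · -- even case: one loop iteration, shift grows by one
      have hdvd : (2 : Int) ∣ m := (PySem.Int.mod_eq_zero_iff_dvd m 2).mp he
      obtain ⟨k, hk⟩ := hdvd
      have hk0 : k ≠ 0 := by omega
      have hshift : m >>> (1 : Nat) = k := by rw [shiftr_one]; omega
      have hkabs : k.natAbs = m.natAbs / 2 := by omega
      have hlt : m.natAbs / 2 < n := by omega
      rw [get_movements_loop.eq_def, dif_pos ⟨he, hm⟩, hshift]
      rw [ih (m.natAbs / 2) hlt k (r >>> (1 : Nat)) hkabs hk0]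
      rw [band_neg_self k hk0, hkabs]
      have habs2 : m.natAbs = 2 * (m.natAbs / 2) := by omega
      have hpos : 0 < m.natAbs / 2 := by omega
      have hlow : natLow m.natAbs = 2 * natLow (m.natAbs / 2) := by
        conv_lhs => rw [habs2]
        rw [natLow_double _ hpos]
      rw [hlow]
      have hlp : 0 < natLow (m.natAbs / 2) := natLow_pos _ hpos
      have hbl : PySem.Int.bitLength ((2 * natLow (m.natAbs / 2) : Nat) : Int)
          = PySem.Int.bitLength ((natLow (m.natAbs / 2) : Nat) : Int) + 1 := by
        rw [PySem.Int.bitLength_natCast (m := 2 * natLow (m.natAbs / 2)) (by omega)]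
        congr 2
        omega
      rw [hbl]
      have hblp := bitLength_pos _ hlp
      have : PySem.Int.bitLength ((natLow (m.natAbs / 2) : Nat) : Int) + 1 - 1
          = (PySem.Int.bitLength ((natLow (m.natAbs / 2) : Nat) : Int) - 1) + 1 := by omega
      rw [this, shiftr_succ r (PySem.Int.bitLength ((natLow (m.natAbs / 2) : Nat) : Int) - 1)]
    · -- odd case: the loop stops; the closed-form shift is 0
      have hodd : m.natAbs % 2 = 1 := by
        have := PySem.Int.mod_two_eq m
        have hb : PySem.Int.mod m 2 = 1 := by
          rcases this with h | h
          · exact absurd h he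
          · exact h
        rw [PySem.Int.mod_eq_emod_of_pos (by norm_num)] at hb
        omega
      rw [natLow_of_odd _ hodd]
      have : PySem.Int.bitLength ((1 : Nat) : Int) - 1 = 0 := by decide
      rw [this]
      have hr0 : r >>> (0 : Nat) = r := by
        rw [Int.shiftRight_eq_div_pow]; norm_num
      rw [hr0, get_movements_loop.eq_def, dif_neg (by tauto)]
      rfl

-- ===== VERDICT (by name: the statement is the Claim_ definition above) =====
theorem get_movements_spec : Claim_equal_get_movements := by
  intro integer mask _hdom hpre
  unfold Spec_get_movements get_movements get_movements_alt
  rw [loop_eq_closed mask.natAbs mask (PySem.Int.band integer mask) rfl hpre]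
  rfl
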